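-- pv_equiv track=rewrite | github.com/AlessiaYanChen/medical-research-rag-pipeline | src/app/ingestion/reconciliation_utils.py | build_qdrant_doc_summary
-- ===== SOURCE A (Python) =====
-- from typing import Any
--
-- def build_qdrant_doc_summary(records: list[dict[str, Any]]) -> dict[str, dict[str, int]]:
--     summary: dict[str, dict[str, int]] = {}
--     for record in records:
--         doc_id = str(record.get("doc_id", "")).strip()
--         if not doc_id:
--             continue
--         chunk_type = str(record.get("chunk_type", "")).strip().lower()
--         entry = summary.setdefault(
--             doc_id,
--             {
--                 "chunks": 0,
--                 "text_chunks": 0,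
--                 "table_chunks": 0,
--             },
--         )
--         entry["chunks"] += 1
--         if chunk_type == "table":
--             entry["table_chunks"] += 1
--         else:
--             entry["text_chunks"] += 1
--     return summary
-- ===== SOURCE B (Python) =====
-- def build_qdrant_doc_summary(records):
--     groups: dict = {}
--     for record in records:
--         doc_id = str(record.get("doc_id", "")).strip()
--         if not doc_id:
--             continue
--         chunk_type = str(record.get("chunk_type", "")).strip().lower()
--         groups[doc_id] = groups.get(doc_id, []) + [chunk_type]
--     return {
--         doc_id: {
--             "chunks": len(types),
--             "text_chunks": len(types) - types.count("table"),
--             "table_chunks": types.count("table"),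
--         }
--         for doc_id, types in groups.items()
--     }
-- ===== Notes on version B (the rewrite author's own statement) =====
-- stated objective: alternative
-- what changed: B first groups the normalized chunk_types into a doc_id -> list index (one dict assignment per record, no nested counter dict), then derives each summary row in a second reduce pass as {len, len-count('table'), count('table')}, instead of A's incremental per-record update of three nested counters.
import Mathlib
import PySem

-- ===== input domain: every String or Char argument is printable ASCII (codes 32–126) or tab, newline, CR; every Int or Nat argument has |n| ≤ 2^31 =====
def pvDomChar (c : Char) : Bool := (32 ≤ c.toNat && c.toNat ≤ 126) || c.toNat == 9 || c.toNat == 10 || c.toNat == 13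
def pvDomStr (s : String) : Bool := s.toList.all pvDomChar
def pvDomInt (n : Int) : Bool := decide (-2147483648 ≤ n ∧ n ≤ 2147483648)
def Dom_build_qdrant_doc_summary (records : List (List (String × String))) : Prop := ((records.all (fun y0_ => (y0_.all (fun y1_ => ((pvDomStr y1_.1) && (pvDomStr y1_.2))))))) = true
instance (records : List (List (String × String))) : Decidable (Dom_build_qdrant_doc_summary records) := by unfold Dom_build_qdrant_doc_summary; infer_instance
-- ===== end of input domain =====

-- B replaces A's incremental update of nested per-doc counter dicts by a group-then-reduce
-- shape (doc_id -> list of chunk_types, then one comprehension computing the three counts);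
-- objective: alternative decomposition, same cost.

-- ===== PORT A =====
-- record.get(k, "") on the record dict (assoc list, first match)
def pvRecGet (record : List (String × String)) (k : String) : String :=
  (record.lookup k).getD ""

def build_qdrant_doc_summary (records : List (List (String × String))) : List (String × List (String × Int)) :=
  let summary : PySem.Dict String (PySem.Dict String Int) :=
    records.foldl (fun summary record =>
      let doc_id := PySem.Str.strip (pvRecGet record "doc_id")
      if doc_id = "" then summary
      else
        let chunk_type := PySem.Str.lower (PySem.Str.strip (pvRecGet record "chunk_type"))
        let summary :=
          summary.setdefault doc_id
            (PySem.Dict.ofList [("chunks", 0), ("text_chunks", 0), ("table_chunks", 0)])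
        let entry := summary.getD doc_id PySem.Dict.empty
        let entry := entry.insert "chunks" (entry.getD "chunks" 0 + 1)
        let entry :=
          if chunk_type = "table" then
            entry.insert "table_chunks" (entry.getD "table_chunks" 0 + 1)
          else
            entry.insert "text_chunks" (entry.getD "text_chunks" 0 + 1)
        summary.insert doc_id entry) PySem.Dict.empty
  summary.items.map (fun p => (p.1, p.2.items))

-- ===== PORT B =====
def build_qdrant_doc_summary_alt (records : List (List (String × String))) : List (String × List (String × Int)) :=
  let groups : PySem.Dict String (List String) :=
    records.foldl (fun g record =>
      let doc_id := PySem.Str.strip (pvRecGet record "doc_id")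
      if doc_id = "" then g
      else
        let chunk_type := PySem.Str.lower (PySem.Str.strip (pvRecGet record "chunk_type"))
        g.insert doc_id (g.getD doc_id [] ++ [chunk_type])) PySem.Dict.empty
  groups.items.map (fun p =>
    (p.1, [("chunks", (p.2.length : Int)),
           ("text_chunks", (p.2.length : Int) - p.2.count "table"),
           ("table_chunks", (p.2.count "table" : Int))]))

-- ===== PRECONDITION & SPEC =====
def Spec_build_qdrant_doc_summary (records : List (List (String × String))) (out : List (String × List (String × Int))) : Prop := out = build_qdrant_doc_summary_alt records
instance (records : List (List (String × String))) (out : List (String × List (String × Int))) : Decidable (Spec_build_qdrant_doc_summary records out) := by unfold Spec_build_qdrant_doc_summary; infer_instance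

-- ===== CLAIM (what is proved, stated in full; the proofs are below) =====
def Claim_equal_build_qdrant_doc_summary : Prop := ∀ (records : List (List (String × String))), Dom_build_qdrant_doc_summary records → Spec_build_qdrant_doc_summary records (build_qdrant_doc_summary records)

-- ===== LEMMAS AND PROOFS =====

-- A's loop body and B's loop body as named step functions (definitionally the port bodies)
def pvStepA (summary : PySem.Dict String (PySem.Dict String Int)) (record : List (String × String)) : PySem.Dict String (PySem.Dict String Int) :=
  let doc_id := PySem.Str.strip (pvRecGet record "doc_id")
  if doc_id = "" then summary
  else
    let chunk_type := PySem.Str.lower (PySem.Str.strip (pvRecGet record "chunk_type"))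
    let summary :=
      summary.setdefault doc_id
        (PySem.Dict.ofList [("chunks", 0), ("text_chunks", 0), ("table_chunks", 0)])
    let entry := summary.getD doc_id PySem.Dict.empty
    let entry := entry.insert "chunks" (entry.getD "chunks" 0 + 1)
    let entry :=
      if chunk_type = "table" then
        entry.insert "table_chunks" (entry.getD "table_chunks" 0 + 1)
      else
        entry.insert "text_chunks" (entry.getD "text_chunks" 0 + 1)
    summary.insert doc_id entry

def pvStepB (g : PySem.Dict String (List String)) (record : List (String × String)) : PySem.Dict String (List String) :=
  let doc_id := PySem.Str.strip (pvRecGet record "doc_id")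
  if doc_id = "" then g
  else
    let chunk_type := PySem.Str.lower (PySem.Str.strip (pvRecGet record "chunk_type"))
    g.insert doc_id (g.getD doc_id [] ++ [chunk_type])

-- the summary row B computes for one doc's chunk_type list, as a Dict
def pvInner (ts : List String) : PySem.Dict String Int :=
  PySem.Dict.mk [("chunks", (ts.length : Int)),
                 ("text_chunks", (ts.length : Int) - ts.count "table"),
                 ("table_chunks", (ts.count "table" : Int))]

-- rendering of B's grouping dict as A's nested dict
def pvF (g : PySem.Dict String (List String)) : PySem.Dict String (PySem.Dict String Int) :=
  PySem.Dict.mk (g.items.map (fun p => (p.1, pvInner p.2)))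

theorem pv_get?_F (g : PySem.Dict String (List String)) (k : String) :
    (pvF g).get? k = (g.get? k).map pvInner := by
  obtain ⟨l⟩ := g
  induction l with
  | nil => rfl
  | cons p rest ih =>
    obtain ⟨k', v⟩ := p
    simp only [pvF, List.map_cons] at *
    rw [PySem.Dict.get?_mk_cons, PySem.Dict.get?_mk_cons]
    by_cases hk : (k' == k) = true <;> simp [hk, ih]

theorem pv_contains_F (g : PySem.Dict String (List String)) (k : String) :
    (pvF g).contains k = g.contains k := by
  rw [PySem.Dict.contains_eq_isSome_get?, PySem.Dict.contains_eq_isSome_get?, pv_get?_F]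
  cases g.get? k <;> rfl

theorem pv_F_insert (g : PySem.Dict String (List String)) (d : String) (v : List String) :
    pvF (g.insert d v) = (pvF g).insert d (pvInner v) := by
  apply PySem.Dict.ext
  by_cases h : g.contains d = true
  · rw [pvF, PySem.Dict.items_insert_of_contains _ _ h,
      PySem.Dict.items_insert_of_contains _ _ (by rw [pv_contains_F]; exact h)]
    show _ = (g.items.map _).map _
    rw [List.map_map, List.map_map]
    apply List.map_congr_left
    intro p _
    by_cases hp : p.1 = d <;> simp [hp]
  · rw [pvF, PySem.Dict.items_insert_of_not_contains _ _ (by simpa using h),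
      PySem.Dict.items_insert_of_not_contains _ _
        (by rw [pv_contains_F]; simpa using h)]
    simp [pvF]

-- the three dict updates A performs on one row equal B's recomputed row for ts ++ [ct]
theorem pv_bump (ts : List String) (ct : String) :
    (if ct = "table" then
       ((pvInner ts).insert "chunks" ((pvInner ts).getD "chunks" 0 + 1)).insert "table_chunks"
         (((pvInner ts).insert "chunks" ((pvInner ts).getD "chunks" 0 + 1)).getD "table_chunks" 0 + 1)
     else
       ((pvInner ts).insert "chunks" ((pvInner ts).getD "chunks" 0 + 1)).insert "text_chunks"
         (((pvInner ts).insert "chunks" ((pvInner ts).getD "chunks" 0 + 1)).getD "text_chunks" 0 + 1))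
      = pvInner (ts ++ [ct]) := by
  split
  · next h =>
    subst h
    apply PySem.Dict.ext
    simp [pvInner, PySem.Dict.insert, PySem.Dict.getD, PySem.Dict.get?, PySem.Dict.contains,
      List.count_append, List.count_cons]
    all_goals omega
  · next h =>
    apply PySem.Dict.ext
    simp [pvInner, PySem.Dict.insert, PySem.Dict.getD, PySem.Dict.get?, PySem.Dict.contains,
      List.count_append, List.count_cons, h]
    all_goals omega

theorem pv_step (g : PySem.Dict String (List String)) (record : List (String × String)) :
    pvStepA (pvF g) record = pvF (pvStepB g record) := by
  by_cases hd : PySem.Str.strip (pvRecGet record "doc_id") = ""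
  · simp only [pvStepA, pvStepB, if_pos hd]
  · simp only [pvStepA, pvStepB, if_neg hd]
    by_cases h : g.contains (PySem.Str.strip (pvRecGet record "doc_id")) = true
    · -- existing doc: setdefault no-op, entry = pvInner ts
      obtain ⟨ts, hts⟩ : ∃ ts, g.get? (PySem.Str.strip (pvRecGet record "doc_id")) = some ts := by
        rw [PySem.Dict.contains_eq_isSome_get?] at h
        exact Option.isSome_iff_exists.mp h
      rw [PySem.Dict.setdefault_of_contains _ _ (by rw [pv_contains_F]; exact h)]
      have hget : (pvF g).getD (PySem.Str.strip (pvRecGet record "doc_id")) PySem.Dict.empty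
          = pvInner ts := by
        rw [PySem.Dict.getD_eq_get?_getD, pv_get?_F, hts]; rfl
      rw [hget, pv_bump, PySem.Dict.getD_of_get?_eq_some _ _ hts, pv_F_insert]
    · -- new doc: setdefault inserts the zero row
      have hz : PySem.Dict.ofList [("chunks", (0:Int)), ("text_chunks", 0), ("table_chunks", 0)]
          = pvInner [] := by decide
      rw [PySem.Dict.setdefault_of_not_contains _ _ (by rw [pv_contains_F]; simpa using h),
        PySem.Dict.getD_insert_self,
        PySem.Dict.getD_of_not_contains (k := PySem.Str.strip (pvRecGet record "doc_id")) _ _ (by simpa using h),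
        pv_F_insert, hz, pv_bump, PySem.Dict.insert_insert_self, List.nil_append]

theorem pv_fold (records : List (List (String × String))) (g : PySem.Dict String (List String)) :
    records.foldl pvStepA (pvF g) = pvF (records.foldl pvStepB g) := by
  induction records generalizing g with
  | nil => rfl
  | cons r rest ih => simp only [List.foldl_cons, pv_step, ih]

-- ===== VERDICT (by name: the statement is the Claim_ definition above) =====
theorem build_qdrant_doc_summary_spec : Claim_equal_build_qdrant_doc_summary := by
  intro records _
  show build_qdrant_doc_summary records = build_qdrant_doc_summary_alt records
  have hA : build_qdrant_doc_summary records
      = (records.foldl pvStepA (pvF PySem.Dict.empty)).items.map (fun p => (p.1, p.2.items)) := rfl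
  have hB : build_qdrant_doc_summary_alt records
      = (records.foldl pvStepB PySem.Dict.empty).items.map (fun p =>
          (p.1, [("chunks", (p.2.length : Int)),
                 ("text_chunks", (p.2.length : Int) - p.2.count "table"),
                 ("table_chunks", (p.2.count "table" : Int))])) := rfl
  rw [hA, hB, pv_fold]
  generalize records.foldl pvStepB PySem.Dict.empty = g
  obtain ⟨l⟩ := g
  simp [pvF, pvInner, List.map_map, Function.comp]
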